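-- pv_equiv track=rewrite | github.com/miliar/Code_Jam_Webscraper | solutions_python/Problem_157/625.py | treatRest
-- ===== SOURCE A (Python) =====
-- def treatRest(motif,start):
--     if start < len(motif):
--         curr = c2i(motif[start])
--         for i in range(start+1, len(motif)):
--             curr = ijkMult(curr, c2i(motif[i]))
--         return curr == 1
--     else:
--         return True
--
-- def c2i(a):
--     if a == "i":
--         return 2
--     elif a == "j":
--         return 3
--     elif a == "k":
--         return 4
--     elif a == "a":
--         return 1
--
-- def ijkMult(a,b):
--     if (a < 0):
--         return -ijkMult(-a,b)
--     elif (b < 0):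
--         return -ijkMult(a,-b)
--     elif (a == 1):
--         return b
--     elif (b == 1):
--         return a
--     elif (a == b):
--         return -1
--     elif (a == 2 and b == 3):
--         return 4
--     elif (a == 2 and b == 4):
--         return -3
--     elif (a == 3 and b == 4):
--         return 2
--     else:
--         return -ijkMult(b,a)
-- ===== SOURCE B (Python) =====
-- def treatRest(motif, start):
--     if start >= len(motif):
--         return True
--     s = motif[start:]
--     # counting algorithm: write each unit as (-1)^n * i^x * j^y  (a=1, i, j, k=ij).
--     # The product's exponents are determined by character counts and one weighted
--     # inversion count, no group multiplication needed.
--     cx = sum(ch in 'ik' for ch in s)          # total i-exponent contributed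
--     cy = sum(ch in 'jk' for ch in s)          # total j-exponent contributed
--     cross = 0                                  # sign flips from commuting j's past i's
--     jk = 0
--     for ch in s:
--         if ch in 'ik':
--             cross += jk
--         if ch in 'jk':
--             jk += 1
--     sign = cross + cx // 2 + cy // 2           # plus flips from i*i=-1 and j*j=-1
--     return cx % 2 == 0 and cy % 2 == 0 and sign % 2 == 0
-- ===== Notes on version B (the rewrite author's own statement) =====
-- stated objective: alternative
-- what changed: Replaces A's fold with a quaternion case-table multiplication by a counting algorithm: write each unit as (-1)^n i^x j^y, count i/k and j/k characters and a weighted inversion count (j/k's preceding each i/k), and decide product==1 by three parity formulas.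
-- outside the precondition, e.g. on treatRest('x', 0): A returns False, B returns True; on treatRest('xx', 0): A raises TypeError, B returns True; on treatRest('ii', -2): A returns True, B returns False
import Mathlib
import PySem

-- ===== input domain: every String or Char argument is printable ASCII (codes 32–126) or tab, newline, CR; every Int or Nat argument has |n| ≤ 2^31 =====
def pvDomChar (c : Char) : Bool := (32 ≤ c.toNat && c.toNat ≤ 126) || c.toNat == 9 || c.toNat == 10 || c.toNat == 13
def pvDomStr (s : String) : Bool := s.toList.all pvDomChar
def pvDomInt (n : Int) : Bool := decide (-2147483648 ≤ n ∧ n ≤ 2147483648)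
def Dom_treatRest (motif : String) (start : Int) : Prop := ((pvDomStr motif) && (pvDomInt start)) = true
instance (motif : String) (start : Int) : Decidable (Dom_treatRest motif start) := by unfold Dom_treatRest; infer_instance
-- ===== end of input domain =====

-- B replaces A's quaternion case-table fold by character counting + a weighted inversion count with parity formulas (alternative algorithm, same cost).


-- ===== PORT A =====
-- c2i: Python returns None for unmapped characters; `none` models that None.
def c2i (a : Char) : Option Int :=
  if a = 'i' then some 2
  else if a = 'j' then some 3
  else if a = 'k' then some 4
  else if a = 'a' then some 1
  else none

-- ijkMult with fuel: Python's recursion does not terminate on arbitrary ints; on the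
-- codes ±1..±4 reached under Pre_ the depth is at most 4, so fuel 6 is never exhausted.
def ijkMultF : Nat → Int → Int → Int
  | 0, _, _ => 0
  | fuel + 1, a, b =>
    if a < 0 then -(ijkMultF fuel (-a) b)
    else if b < 0 then -(ijkMultF fuel a (-b))
    else if a = 1 then b
    else if b = 1 then a
    else if a = b then -1
    else if a = 2 ∧ b = 3 then 4
    else if a = 2 ∧ b = 4 then -3
    else if a = 3 ∧ b = 4 then 2
    else -(ijkMultF fuel b a)

-- `curr = ijkMult(curr, c2i(...))`: a None operand makes Python raise TypeError; modelled as none.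
def ijkStep (curr : Option Int) (y : Option Int) : Option Int :=
  match curr, y with
  | some x, some y => some (ijkMultF 6 x y)
  | _, _ => none

def treatRest (motif : String) (start : Int) : Bool :=
  let l := motif.toList
  if start < PySem.List.len l then
    let curr0 : Option Int := c2i (PySem.List.pyGetD l start ' ')
    let curr := (PySem.List.pyRange (start + 1) (PySem.List.len l) 1).foldl
      (fun curr i => ijkStep curr (c2i (PySem.List.pyGetD l i ' '))) curr0
    curr == some 1
  else
    true

-- ===== PORT B =====
-- Source B's fold bodies as named helpers: `sum(ch in 'ik' for ch in s)` etc.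
def bStepX (n : Int) (ch : Char) : Int := n + (if ch = 'i' ∨ ch = 'k' then 1 else 0)
def bStepY (n : Int) (ch : Char) : Int := n + (if ch = 'j' ∨ ch = 'k' then 1 else 0)
-- the explicit loop over (cross, jk)
def bStepC (p : Int × Int) (ch : Char) : Int × Int :=
  (if ch = 'i' ∨ ch = 'k' then p.1 + p.2 else p.1,
   if ch = 'j' ∨ ch = 'k' then p.2 + 1 else p.2)

def treatRest_alt (motif : String) (start : Int) : Bool :=
  let l := motif.toList
  if start ≥ PySem.List.len l then true
  else
    let s := PySem.List.slice l (some start) none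
    let cx := s.foldl bStepX 0
    let cy := s.foldl bStepY 0
    let p := s.foldl bStepC (0, 0)
    let sign := p.1 + PySem.Int.floordiv cx 2 + PySem.Int.floordiv cy 2
    PySem.Int.mod cx 2 == 0 && PySem.Int.mod cy 2 == 0 && PySem.Int.mod sign 2 == 0

-- ===== PRECONDITION & SPEC =====
-- Pre_ restricts start to nonnegative values (the natural domain of a suffix start index;
-- a negative start makes A read via Python's negative-index wraparound or raise IndexError)
-- and requires every character of the suffix to be one of 'i','j','k','a' (otherwise A raises
-- TypeError for suffixes of length >= 2 and returns an accidental False from 'None == 1'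
-- for a length-1 suffix, while B counts the unmapped character as the identity).
def Pre_treatRest (motif : String) (start : Int) : Prop :=
  0 ≤ start ∧
    ((motif.toList.drop start.toNat).all
      (fun c => (['i', 'j', 'k', 'a'] : List Char).contains c)) = true
instance (motif : String) (start : Int) : Decidable (Pre_treatRest motif start) := by
  unfold Pre_treatRest; infer_instance

def pvWitness_treatRest : String × Int := ("ijk", 0)

def Spec_treatRest (motif : String) (start : Int) (out : Bool) : Prop := out = treatRest_alt motif start
instance (motif : String) (start : Int) (out : Bool) : Decidable (Spec_treatRest motif start out) := by unfold Spec_treatRest; infer_instance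

-- ===== CLAIM (what is proved, stated in full; the proofs are below) =====
def Claim_equal_treatRest : Prop := ∀ (motif : String) (start : Int), Dom_treatRest motif start → Pre_treatRest motif start → Spec_treatRest motif start (treatRest motif start)

-- ===== LEMMAS AND PROOFS =====

-- proof-side helpers: the code a valid character denotes,
-- and the (i-exponent, j-exponent, sign) bits a code denotes (w = (-1)^n i^x j^y).
def cval (c : Char) : Int := (c2i c).getD 0

def decode (w : Int) : Bool × Bool × Bool :=
  (w.natAbs == 2 || w.natAbs == 4, w.natAbs == 3 || w.natAbs == 4, w < 0)

def codes : List Int := [1, -1, 2, -2, 3, -3, 4, -4]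

-- the connection between A's running code and B's running counters
def InvQ (w cx cy cross : Int) : Prop :=
  ((cx % 2 = 1) ↔ (decode w).1 = true) ∧
  ((cy % 2 = 1) ↔ (decode w).2.1 = true) ∧
  (((cross + cx / 2 + cy / 2) % 2 = 1) ↔ (decode w).2.2 = true)

def tstep (t : Bool × Bool × Bool) (c : Char) : Bool × Bool × Bool :=
  if c = 'i' then (!t.1, t.2.1, (t.2.2 != t.2.1) != t.1)
  else if c = 'j' then (t.1, !t.2.1, t.2.2 != t.2.1)
  else if c = 'k' then (!t.1, !t.2.1, t.2.2 != t.1)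
  else t

lemma mul_decode : ∀ w ∈ codes, ∀ c ∈ (['i', 'j', 'k', 'a'] : List Char),
    ijkMultF 6 w (cval c) ∈ codes ∧
      decode (ijkMultF 6 w (cval c)) = tstep (decode w) c := by
  intro w hw c hc
  fin_cases hw <;> fin_cases hc <;> exact ⟨by decide, by decide⟩

lemma step_all (c : Char) (hc : c ∈ (['i', 'j', 'k', 'a'] : List Char))
    (w cx cy cross : Int) (hw : w ∈ codes) (hm : InvQ w cx cy cross) :
    ijkMultF 6 w (cval c) ∈ codes ∧
      InvQ (ijkMultF 6 w (cval c)) (bStepX cx c) (bStepY cy c) (bStepC (cross, cy) c).1 := by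
  obtain ⟨hw1, hdec⟩ := mul_decode w hw c hc
  refine ⟨hw1, ?_⟩
  unfold InvQ at hm ⊢
  rw [hdec]
  obtain ⟨h1, h2, h3⟩ := hm
  simp only [List.mem_cons, List.not_mem_nil, or_false] at hc
  rcases hc with h | h | h | h <;> subst h <;>
    simp only [tstep, bStepX, bStepY, bStepC] <;> norm_num <;>
    cases hb1 : (decode w).1 <;> cases hb2 : (decode w).2.1 <;> cases hb3 : (decode w).2.2 <;>
      simp [hb1, hb2, hb3] at h1 h2 h3 ⊢ <;> omega

lemma mainInv (cs : List Char)
    (hcs : ∀ c ∈ cs, c ∈ (['i', 'j', 'k', 'a'] : List Char)) :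
    ∀ (w cx cy cross : Int), w ∈ codes → InvQ w cx cy cross →
      ∃ w', cs.foldl (fun curr c => ijkStep curr (c2i c)) (some w) = some w' ∧ w' ∈ codes ∧
        InvQ w' (cs.foldl bStepX cx) (cs.foldl bStepY cy) (cs.foldl bStepC (cross, cy)).1 ∧
        (cs.foldl bStepC (cross, cy)).2 = cs.foldl bStepY cy := by
  induction cs with
  | nil => exact fun w cx cy cross hw hm => ⟨w, rfl, hw, hm, rfl⟩
  | cons c cs ih =>
    intro w cx cy cross hw hm
    have hc := hcs c (List.mem_cons_self ..)
    obtain ⟨hw1, hm1⟩ := step_all c hc w cx cy cross hw hm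
    have hstep : ijkStep (some w) (c2i c) = some (ijkMultF 6 w (cval c)) := by
      simp only [List.mem_cons, List.not_mem_nil, or_false] at hc
      rcases hc with h | h | h | h <;> subst h <;> rfl
    have hpair : bStepC (cross, cy) c = ((bStepC (cross, cy) c).1, bStepY cy c) := by
      simp only [List.mem_cons, List.not_mem_nil, or_false] at hc
      rcases hc with h | h | h | h <;> subst h <;> simp [bStepC, bStepY]
    obtain ⟨w', hA, hw', hI, hJ⟩ :=
      ih (fun x hx => hcs x (List.mem_cons_of_mem _ hx)) _ _ _ _ hw1 hm1
    refine ⟨w', ?_, hw', ?_, ?_⟩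
    · rw [List.foldl_cons, hstep]; exact hA
    · rw [List.foldl_cons, List.foldl_cons, List.foldl_cons, hpair]; exact hI
    · rw [List.foldl_cons, List.foldl_cons, hpair]; exact hJ

lemma final_corr (w cx cy cross : Int) (hw : w ∈ codes) (hm : InvQ w cx cy cross) :
    (w == 1) =
      (PySem.Int.mod cx 2 == 0 && PySem.Int.mod cy 2 == 0 &&
        PySem.Int.mod (cross + PySem.Int.floordiv cx 2 + PySem.Int.floordiv cy 2) 2 == 0) := by
  rw [PySem.Int.mod_eq_emod_of_pos (by norm_num), PySem.Int.mod_eq_emod_of_pos (by norm_num),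
    PySem.Int.mod_eq_emod_of_pos (by norm_num), PySem.Int.floordiv_eq_ediv_of_pos (by norm_num),
    PySem.Int.floordiv_eq_ediv_of_pos (by norm_num), Bool.eq_iff_iff]
  simp only [Bool.and_eq_true, beq_iff_eq]
  simp only [codes, List.mem_cons, List.not_mem_nil, or_false] at hw
  rcases hw with h | h | h | h | h | h | h | h <;> subst h <;>
    simp only [InvQ, decode] at hm <;> norm_num at hm ⊢ <;> omega

lemma first_char (c : Char) (hc : c ∈ (['i', 'j', 'k', 'a'] : List Char)) :
    c2i c = some (cval c) ∧ cval c ∈ codes ∧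
      InvQ (cval c) (bStepX 0 c) (bStepY 0 c) (bStepC (0, 0) c).1 ∧
      (bStepC (0, 0) c).2 = bStepY 0 c := by
  simp only [List.mem_cons, List.not_mem_nil, or_false] at hc
  rcases hc with h | h | h | h <;> subst h <;>
    exact ⟨rfl, by decide, by unfold InvQ; decide, by decide⟩

-- ===== VERDICT (by name: the statement is the Claim_ definition above) =====
theorem treatRest_spec : Claim_equal_treatRest := by
  intro motif start _hdom hpre
  obtain ⟨hs, hallb⟩ := hpre
  have hall : ∀ c ∈ motif.toList.drop start.toNat, c ∈ (['i', 'j', 'k', 'a'] : List Char) := by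
    simpa using hallb
  unfold Spec_treatRest
  simp only [treatRest, treatRest_alt]
  set l := motif.toList with hl
  rw [PySem.List.slice_from _ hs]
  by_cases hlt : start < PySem.List.len l
  · have hlen : start.toNat < l.length := by
      have := PySem.List.len_eq l; omega
    rw [if_pos hlt, if_neg (by omega)]
    have hdrop : l.drop start.toNat = l[start.toNat] :: l.drop (start.toNat + 1) :=
      List.drop_eq_getElem_cons hlen
    have hc0 : l[start.toNat] ∈ l.drop start.toNat := by rw [hdrop]; exact List.mem_cons_self ..
    have hc0v := hall _ hc0
    obtain ⟨hci, hmem, hinv, hjk⟩ := first_char _ hc0v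
    have hg : PySem.List.pyGetD l start ' ' = l[start.toNat] :=
      PySem.List.pyGetD_eq_getElem l ' ' hs (by have := PySem.List.len_eq l; omega)
    have hfold := PySem.List.foldl_pyRange_pyGetD l ' '
      (fun curr c => ijkStep curr (c2i c))
      (c2i (PySem.List.pyGetD l start ' ')) (a := start + 1) (by omega)
    have htn : (start + 1).toNat = start.toNat + 1 := by omega
    have hrest : ∀ c ∈ l.drop (start.toNat + 1), c ∈ (['i', 'j', 'k', 'a'] : List Char) := by
      intro c hcmem
      exact hall c (by rw [hdrop]; exact List.mem_cons_of_mem _ hcmem)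
    obtain ⟨w', hA, hw', hI, hJ⟩ :=
      mainInv _ hrest (cval l[start.toNat]) (bStepX 0 l[start.toNat])
        (bStepY 0 l[start.toNat]) (bStepC (0, 0) l[start.toNat]).1 hmem hinv
    have hfold' :
        (PySem.List.pyRange (start + 1) (PySem.List.len l) 1).foldl
            (fun curr i => ijkStep curr (c2i (PySem.List.pyGetD l i ' ')))
            (c2i (PySem.List.pyGetD l start ' '))
          = (l.drop (start.toNat + 1)).foldl (fun curr c => ijkStep curr (c2i c))
              (c2i (PySem.List.pyGetD l start ' ')) := by rw [← htn]; exact hfold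
    rw [hfold', hg, hci, hA]
    have hpair0 : bStepC (0, 0) l[start.toNat]
        = ((bStepC (0, 0) l[start.toNat]).1, bStepY 0 l[start.toNat]) := by
      rw [← hjk]
    rw [hdrop, List.foldl_cons, List.foldl_cons, List.foldl_cons, hpair0]
    exact final_corr w' _ _ _ hw' hI
  · rw [if_neg hlt, if_pos (by omega)]
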